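-- pv_equiv track=rewrite | github.com/Wulfic/Cicada3301 | Tools/check_pages_31_54_simple.py | totient_decrypt
-- ===== SOURCE A (Python) =====
-- def generate_primes(n):
--     """Generate first n primes"""
--     primes = []
--     candidate = 2
--     while len(primes) < n:
--         is_prime = True
--         for p in primes:
--             if p * p > candidate:
--                 break
--             if candidate % p == 0:
--                 is_prime = False
--                 break
--         if is_prime:
--             primes.append(candidate)
--         candidate += 1
--     return primes
--
-- def totient_decrypt(cipher):
--     """φ(prime) decryption like Pages 55-74"""
--     primes = generate_primes(len(cipher) + 100)
--     result = []
--     key_idx = 0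
--
--     for i, c in enumerate(cipher):
--         # Check for literal F (cipher[i] == 0)
--         if c == 0:
--             result.append(0)
--             # Don't increment key for literal F
--         else:
--             phi = primes[key_idx] - 1  # φ(prime) = prime - 1
--             p = (c - phi) % 29
--             result.append(p)
--             key_idx += 1
--
--     return result
-- ===== SOURCE B (Python) =====
-- def totient_decrypt(cipher):
--     """Fused single pass: advance a candidate counter and test primality on demand
--     by direct trial division (no precomputed prime list, no key index)."""
--     def is_prime(n):
--         if n < 2:
--             return False
--         d = 2
--         while d * d <= n:
--             if n % d == 0:
--                 return False
--             d += 1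
--         return True
--
--     result = []
--     p = 2
--     for c in cipher:
--         if c == 0:
--             result.append(0)
--         else:
--             while not is_prime(p):
--                 p += 1
--             result.append((c - (p - 1)) % 29)
--             p += 1
--     return result
-- ===== Notes on version B (the rewrite author's own statement) =====
-- stated objective: simpler
-- what changed: B drops A's precomputed first-(len+100)-primes list and key_idx bookkeeping: one fused pass over the cipher advances a candidate counter and finds each needed prime on demand by direct trial division over all divisors up to sqrt, so no prime list is stored or indexed.
import Mathlib
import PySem

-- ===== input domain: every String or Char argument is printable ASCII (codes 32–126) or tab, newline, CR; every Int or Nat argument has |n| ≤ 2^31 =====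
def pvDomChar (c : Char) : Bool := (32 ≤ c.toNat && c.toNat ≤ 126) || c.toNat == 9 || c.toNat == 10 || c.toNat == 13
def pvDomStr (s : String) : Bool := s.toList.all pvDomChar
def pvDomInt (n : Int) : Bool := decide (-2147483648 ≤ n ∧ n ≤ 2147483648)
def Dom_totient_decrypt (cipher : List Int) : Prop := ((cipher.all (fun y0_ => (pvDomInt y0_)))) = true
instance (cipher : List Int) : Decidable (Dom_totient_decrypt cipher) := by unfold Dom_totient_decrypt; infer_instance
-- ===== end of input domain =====

-- B replaces A's precomputed first-(len+100)-primes list and key index with a fused single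
-- pass that finds each needed prime on demand by direct trial division (objective: simpler).

-- ===== PORT A =====
-- inner `for p in primes` loop of generate_primes, with its two breaks
def pvTrialLoop : List Int → Int → Bool
  | [], _ => true
  | p :: ps, cand =>
    if p * p > cand then true
    else if PySem.Int.mod cand p == 0 then false
    else pvTrialLoop ps cand

-- `while len(primes) < n` loop; the fuel only guards totality (the loop exits by its own condition,
-- and pvExistsCount provides enough fuel for it to do so)
def pvGenLoop : Nat → Int → List Int → Int → List Int
  | 0, _, primes, _ => primes
  | fuel + 1, n, primes, cand =>
    if (primes.length : Int) < n then
      pvGenLoop fuel n (if pvTrialLoop primes cand then primes ++ [cand] else primes) (cand + 1)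
    else primes

-- totality witness for A's while-loop: there are at least n primes below some bound
lemma pvExistsCount (n : Nat) : ∃ m, n ≤ Nat.count Nat.Prime m := by
  induction n with
  | zero => exact ⟨0, Nat.zero_le _⟩
  | succ k ih =>
    obtain ⟨m, hm⟩ := ih
    obtain ⟨q, hq, hqp⟩ := Nat.exists_infinite_primes m
    refine ⟨q + 1, ?_⟩
    have h1 : Nat.count Nat.Prime m ≤ Nat.count Nat.Prime q := Nat.count_monotone Nat.Prime hq
    rw [Nat.count_succ, if_pos hqp]
    omega

def generate_primes (n : Int) : List Int :=
  pvGenLoop (Nat.find (pvExistsCount n.toNat)) n [] 2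

-- `for i, c in enumerate(cipher)` loop of totient_decrypt (the index i is unused by A's body);
-- primes[key_idx] is always in range (key_idx ≤ #nonzero ≤ len < len+100), so the getD default is dead
def pvALoop : List Int → List Int → Nat → List Int
  | [], _, _ => []
  | c :: cs, primes, keyIdx =>
    if c == 0 then 0 :: pvALoop cs primes keyIdx
    else
      let phi := (PySem.List.pyGet? primes (keyIdx : Int)).getD 0 - 1
      PySem.Int.mod (c - phi) 29 :: pvALoop cs primes (keyIdx + 1)

def totient_decrypt (cipher : List Int) : List Int :=
  pvALoop cipher (generate_primes ((cipher.length : Int) + 100)) 0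

-- ===== PORT B =====
-- `while d * d <= n` loop of is_prime; fuel n.toNat+1 dominates the loop's own exit
def pvIpLoop : Nat → Int → Int → Bool
  | 0, _, _ => true
  | fuel + 1, n, d =>
    if d * d ≤ n then
      if PySem.Int.mod n d == 0 then false
      else pvIpLoop fuel n (d + 1)
    else true

def pvIsPrime (n : Int) : Bool :=
  if n < 2 then false else pvIpLoop (n.toNat + 1) n 2

-- the two lemmas below are cited by pvNextPrime's definition (totality of `while not is_prime(p)`)
lemma pvIpLoop_correct : ∀ (fuel D N : Nat), 2 ≤ D → N + 1 ≤ D + fuel →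
    (pvIpLoop fuel (N : Int) (D : Int) = true ↔ ∀ e, D ≤ e → e * e ≤ N → ¬ e ∣ N) := by
  intro fuel
  induction fuel with
  | zero =>
    intro D N hD hf
    simp only [pvIpLoop, true_iff]
    intro e he hee
    exfalso
    have : 2 ≤ e := le_trans hD he
    nlinarith
  | succ fuel ih =>
    intro D N hD hf
    simp only [pvIpLoop]
    by_cases hdd : (D : Int) * D ≤ N
    · rw [if_pos hdd]
      have hddN : D * D ≤ N := by exact_mod_cast hdd
      by_cases hdvd : D ∣ N
      · have : PySem.Int.mod (N : Int) (D : Int) = 0 := by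
          rw [PySem.Int.mod_eq_zero_iff_dvd]; exact_mod_cast hdvd
        rw [this]
        simp only [beq_self_eq_true, if_true]
        constructor
        · intro h; cases h
        · intro h; exact absurd hdvd (h D le_rfl hddN)
      · have : ¬ PySem.Int.mod (N : Int) (D : Int) = 0 := by
          rw [PySem.Int.mod_eq_zero_iff_dvd]; exact_mod_cast hdvd
        rw [if_neg (by simpa using this)]
        have : ((D : Int) + 1) = ((D + 1 : Nat) : Int) := by push_cast; ring
        rw [this, ih (D + 1) N (by omega) (by omega)]
        constructor
        · intro h e he hee hdv
          rcases Nat.eq_or_lt_of_le he with rfl | hlt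
          · exact hdvd hdv
          · exact h e hlt hee hdv
        · intro h e he hee; exact h e (by omega) hee
    · rw [if_neg hdd]
      simp only [true_iff]
      intro e he hee hdv
      have : D * D ≤ e * e := Nat.mul_le_mul he he
      have : ¬ (D * D ≤ N) := by exact_mod_cast hdd
      omega

lemma pvIsPrime_iff (n : Int) : pvIsPrime n = true ↔ 2 ≤ n ∧ Nat.Prime n.toNat := by
  unfold pvIsPrime
  by_cases hn : n < 2
  · rw [if_pos hn]; simp; omega
  · rw [if_neg hn]
    have h2 : 2 ≤ n := by omega
    have hN : n = ((n.toNat : Nat) : Int) := by omega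
    set N := n.toNat with hNdef
    have h2N : 2 ≤ N := by omega
    have key := pvIpLoop_correct (N + 1) 2 N le_rfl (by omega)
    rw [show ((2 : Nat) : Int) = (2 : Int) from rfl, show ((N : Nat) : Int) = n from by omega] at key
    rw [key, Nat.prime_def_le_sqrt]
    constructor
    · intro h
      exact ⟨h2, h2N, fun m hm hms => h m hm (Nat.le_sqrt.mp hms)⟩
    · intro h e he hee
      exact h.2.2 e he (Nat.le_sqrt.mpr hee)

lemma pvNextPrimeEx (p : Int) : ∃ k : Nat, pvIsPrime (p + k) = true := by
  obtain ⟨q, hq, hqp⟩ := Nat.exists_infinite_primes (max 2 p.toNat)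
  refine ⟨((q : Int) - p).toNat, ?_⟩
  have hp2 : p ≤ (q : Int) := by
    have := le_trans (le_max_right 2 p.toNat) hq
    omega
  have : p + (((q : Int) - p).toNat : Int) = (q : Int) := by omega
  rw [this, pvIsPrime_iff]
  have h2 : 2 ≤ q := le_trans (le_max_left 2 p.toNat) hq
  exact ⟨by exact_mod_cast h2, by simpa using hqp⟩

-- `while not is_prime(p): p += 1` : the first q ≥ p with is_prime(q)
def pvNextPrime (p : Int) : Int := p + (Nat.find (pvNextPrimeEx p) : Int)

-- `for c in cipher` loop of B, state = (result so far, candidate p)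
def pvBLoop : List Int → Int → List Int
  | [], _ => []
  | c :: cs, p =>
    if c == 0 then 0 :: pvBLoop cs p
    else
      let q := pvNextPrime p
      PySem.Int.mod (c - (q - 1)) 29 :: pvBLoop cs (q + 1)

def totient_decrypt_alt (cipher : List Int) : List Int := pvBLoop cipher 2

-- ===== PRECONDITION & SPEC =====
def Spec_totient_decrypt (cipher : List Int) (out : List Int) : Prop := out = totient_decrypt_alt cipher
instance (cipher : List Int) (out : List Int) : Decidable (Spec_totient_decrypt cipher out) := by unfold Spec_totient_decrypt; infer_instance

-- ===== CLAIM (what is proved, stated in full; the proofs are below) =====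
def Claim_equal_totient_decrypt : Prop := ∀ (cipher : List Int), Dom_totient_decrypt cipher → Spec_totient_decrypt cipher (totient_decrypt cipher)

-- ===== LEMMAS AND PROOFS =====

-- common reference point: both sides emit, for the k-th nonzero cipher entry, (c - (p_k - 1)) % 29
-- where p_k is the k-th prime
noncomputable def pvSpecLoop : List Int → Nat → List Int
  | [], _ => []
  | c :: cs, k =>
    if c == 0 then 0 :: pvSpecLoop cs k
    else PySem.Int.mod (c - (((Nat.nth Nat.Prime k : Nat) : Int) - 1)) 29 :: pvSpecLoop cs (k + 1)

-- the primes accumulated by A's generator once the candidate has reached c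
def pvL (c : Nat) : List Int := ((List.range c).filter fun i => Nat.Prime i).map (fun i : Nat => (i : Int))

lemma pvL_succ (c : Nat) :
    pvL (c + 1) = if Nat.Prime c then pvL c ++ [(c : Int)] else pvL c := by
  unfold pvL
  rw [List.range_succ, List.filter_append]
  by_cases h : Nat.Prime c
  · rw [if_pos h]
    simp [h]
  · rw [if_neg h]
    simp [h]

lemma pvL_length (c : Nat) : (pvL c).length = Nat.count Nat.Prime c := by
  simp [pvL, Nat.count, List.countP_eq_length_filter]

lemma pvTrial_true (c : Nat) (hc : Nat.Prime c) :
    ∀ ns : List Nat, (∀ q ∈ ns, 2 ≤ q ∧ q < c) →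
      pvTrialLoop (ns.map (fun i : Nat => (i : Int))) (c : Int) = true := by
  intro ns
  induction ns with
  | nil => intro _; rfl
  | cons q ns ih =>
    intro hq
    obtain ⟨hq2, hqc⟩ := hq q (List.mem_cons_self ..)
    rw [List.map_cons, pvTrialLoop]
    by_cases hb : (q : Int) * q > c
    · rw [if_pos hb]
    · rw [if_neg hb]
      have hndvd : ¬ (q ∣ c) := by
        intro hdvd
        rcases hc.eq_one_or_self_of_dvd q hdvd with h1 | h1 <;> omega
      have hm : ¬ PySem.Int.mod (c : Int) (q : Int) = 0 := by
        rw [PySem.Int.mod_eq_zero_iff_dvd]; exact_mod_cast hndvd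
      rw [if_neg (by simpa using hm)]
      exact ih (fun r hr => hq r (List.mem_cons_of_mem _ hr))

lemma pvTrial_false (c m : Nat) (hmm : m * m ≤ c) (hdvd : m ∣ c) :
    ∀ ns : List Nat, List.Pairwise (· < ·) ns → m ∈ ns → (∀ q ∈ ns, q < m → ¬ q ∣ c) →
      pvTrialLoop (ns.map (fun i : Nat => (i : Int))) (c : Int) = false := by
  intro ns
  induction ns with
  | nil => intro _ hm _; cases hm
  | cons q ns ih =>
    intro hpw hm hq
    rw [List.map_cons, pvTrialLoop]
    rcases List.mem_cons.mp hm with rfl | hm'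
    · rw [if_neg (by exact_mod_cast not_lt.mpr hmm)]
      have hz : PySem.Int.mod (c : Int) (m : Int) = 0 := by
        rw [PySem.Int.mod_eq_zero_iff_dvd]; exact_mod_cast hdvd
      rw [hz]
      simp
    · have hqm : q < m := (List.pairwise_cons.mp hpw).1 m hm'
      have hqq : q * q < c := lt_of_lt_of_le (Nat.mul_lt_mul'' hqm hqm) hmm
      rw [if_neg (by exact_mod_cast not_lt.mpr (le_of_lt hqq))]
      have hnd : ¬ (q ∣ c) := hq q (List.mem_cons_self ..) hqm
      have hm2 : ¬ PySem.Int.mod (c : Int) (q : Int) = 0 := by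
        rw [PySem.Int.mod_eq_zero_iff_dvd]; exact_mod_cast hnd
      rw [if_neg (by simpa using hm2)]
      exact ih (List.pairwise_cons.mp hpw).2 hm'
        (fun r hr => hq r (List.mem_cons_of_mem _ hr))

lemma pvTrial_eq (c : Nat) (hc : 2 ≤ c) :
    pvTrialLoop (pvL c) (c : Int) = decide (Nat.Prime c) := by
  by_cases hp : Nat.Prime c
  · rw [decide_eq_true hp]
    unfold pvL
    apply pvTrial_true c hp
    intro q hqmem
    rw [List.mem_filter] at hqmem
    have hq : Nat.Prime q := by simpa using hqmem.2
    exact ⟨hq.two_le, List.mem_range.mp hqmem.1⟩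
  · rw [decide_eq_false hp]
    have hmp : Nat.Prime (Nat.minFac c) := Nat.minFac_prime (by omega)
    have hmm : Nat.minFac c * Nat.minFac c ≤ c := by
      have := Nat.minFac_sq_le_self (by omega) hp
      rwa [pow_two] at this
    have hdvd := Nat.minFac_dvd c
    have hmc : Nat.minFac c < c := by
      rcases Nat.lt_or_ge (Nat.minFac c) c with h | h
      · exact h
      · have h1 : Nat.minFac c ≤ c := Nat.le_of_dvd (by omega) hdvd
        have : Nat.minFac c = c := le_antisymm h1 h
        exact absurd (this ▸ hmp) hp
    unfold pvL
    apply pvTrial_false c (Nat.minFac c) hmm hdvd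
    · exact (List.pairwise_lt_range (n := c)).sublist (List.filter_sublist ..)
    · rw [List.mem_filter]
      exact ⟨List.mem_range.mpr hmc, by simpa using hmp⟩
    · intro q hqmem hqm hqdvd
      rw [List.mem_filter] at hqmem
      have hq : Nat.Prime q := by simpa using hqmem.2
      have := Nat.minFac_le_of_dvd hq.two_le hqdvd
      omega

lemma pvFilterRange (m : Nat) :
    (List.range m).filter (fun i => Nat.Prime i) =
      (List.range (Nat.count Nat.Prime m)).map (Nat.nth Nat.Prime) := by
  induction m with
  | zero => simp
  | succ m ih =>
    rw [List.range_succ, List.filter_append, ih, Nat.count_succ]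
    by_cases h : Nat.Prime m
    · rw [if_pos h, List.range_succ, List.map_append]
      simp [h, Nat.nth_count h]
    · rw [if_neg h]
      simp [h]

lemma pvL_target (n c : Nat) (h : Nat.count Nat.Prime c = n) :
    pvL c = (List.range n).map (fun i => ((Nat.nth Nat.Prime i : Nat) : Int)) := by
  rw [pvL, pvFilterRange, h, List.map_map]
  rfl

lemma pvGenHit (n : Nat) : ∀ (fuel c : Nat), 2 ≤ c → Nat.count Nat.Prime c ≤ n →
    n ≤ Nat.count Nat.Prime (c + fuel) →
    pvGenLoop fuel (n : Int) (pvL c) (c : Int)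
      = (List.range n).map (fun i => ((Nat.nth Nat.Prime i : Nat) : Int)) := by
  intro fuel
  induction fuel with
  | zero =>
    intro c hc hle hge
    simp only [Nat.add_zero] at hge
    exact pvL_target n c (le_antisymm hle hge) ▸ rfl
  | succ fuel ih =>
    intro c hc hle hge
    rw [pvGenLoop]
    by_cases hlt : Nat.count Nat.Prime c < n
    · rw [if_pos (by rw [pvL_length]; exact_mod_cast hlt)]
      have htr : (if pvTrialLoop (pvL c) (c : Int) then pvL c ++ [(c : Int)] else pvL c)
          = pvL (c + 1) := by
        rw [pvTrial_eq c hc, pvL_succ]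
        by_cases h : Nat.Prime c <;> simp [h]
      rw [htr, show ((c : Int) + 1) = ((c + 1 : Nat) : Int) by push_cast; ring]
      apply ih (c + 1) (by omega) ?_ ?_
      · rw [Nat.count_succ]
        split_ifs <;> omega
      · rw [show c + 1 + fuel = c + (fuel + 1) by omega]
        exact hge
    · rw [if_neg (by rw [pvL_length]; exact_mod_cast hlt)]
      exact pvL_target n c (le_antisymm hle (by omega))

lemma pvGenerate (n : Nat) :
    generate_primes (n : Int) = (List.range n).map (fun i => ((Nat.nth Nat.Prime i : Nat) : Int)) := by
  unfold generate_primes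
  simp only [Int.toNat_natCast]
  have hF : n ≤ Nat.count Nat.Prime (Nat.find (pvExistsCount n)) := Nat.find_spec (pvExistsCount n)
  have h2 : n ≤ Nat.count Nat.Prime (2 + Nat.find (pvExistsCount n)) :=
    le_trans hF (Nat.count_monotone Nat.Prime (by omega))
  have h0 : Nat.count Nat.Prime 2 = 0 := by decide
  have hL : pvL 2 = ([] : List Int) := by decide
  have := pvGenHit n (Nat.find (pvExistsCount n)) 2 le_rfl (by omega) h2
  rw [hL] at this
  exact_mod_cast this

lemma pvALoop_spec (n : Nat) : ∀ (cs : List Int) (k : Nat), k + cs.length ≤ n →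
    pvALoop cs ((List.range n).map (fun i => ((Nat.nth Nat.Prime i : Nat) : Int))) k
      = pvSpecLoop cs k := by
  intro cs
  induction cs with
  | nil => intro k h; rfl
  | cons c cs ih =>
    intro k hk
    rw [List.length_cons] at hk
    rw [pvALoop, pvSpecLoop]
    by_cases h0 : c == 0
    · rw [if_pos h0, if_pos h0, ih k (by omega)]
    · rw [if_neg h0, if_neg h0]
      have hkn : k < n := by omega
      have hget : PySem.List.pyGet?
          ((List.range n).map (fun i => ((Nat.nth Nat.Prime i : Nat) : Int))) (k : Int)
          = some ((Nat.nth Nat.Prime k : Nat) : Int) := by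
        rw [PySem.List.pyGet?_natCast]
        simp [hkn]
      rw [hget]
      simp only [Option.getD_some]
      rw [ih (k + 1) (by omega)]

lemma pvNextPrime_eq (p : Int) (hp : 2 ≤ p) :
    pvNextPrime p = ((Nat.nth Nat.Prime (Nat.count Nat.Prime p.toNat) : Nat) : Int) := by
  have hinf := Nat.infinite_setOf_prime
  set P := p.toNat with hP
  set k := Nat.count Nat.Prime P with hk
  set q := Nat.nth Nat.Prime k with hq
  have hqprime : Nat.Prime q := Nat.nth_mem_of_infinite hinf k
  have hcq : Nat.count Nat.Prime q = k := Nat.count_nth_of_infinite hinf k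
  have hPq : P ≤ q := by
    by_contra h
    push Not at h
    have h1 : Nat.count Nat.Prime (q + 1) ≤ k := hk ▸ Nat.count_monotone Nat.Prime (by omega)
    rw [Nat.count_succ, if_pos hqprime, hcq] at h1
    omega
  have hnone : ∀ r, P ≤ r → r < q → ¬ Nat.Prime r := by
    intro r h1 h2 hr
    have hcr : k ≤ Nat.count Nat.Prime r := hk ▸ Nat.count_monotone Nat.Prime h1
    have hnc := Nat.nth_count hr
    have hle : q ≤ Nat.nth Nat.Prime (Nat.count Nat.Prime r) := (Nat.nth_le_nth hinf).mpr hcr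
    omega
  have hfind : Nat.find (pvNextPrimeEx p) = q - P := by
    rw [Nat.find_eq_iff]
    constructor
    · rw [pvIsPrime_iff]
      rw [show p + ((q - P : Nat) : Int) = (q : Int) by omega]
      exact ⟨by exact_mod_cast hqprime.two_le, by simpa using hqprime⟩
    · intro j hj
      rw [pvIsPrime_iff]
      intro hcontr
      obtain ⟨h1, h2⟩ := hcontr
      rw [show (p + (j : Int)).toNat = P + j by omega] at h2
      exact hnone (P + j) (by omega) (by omega) h2
  rw [pvNextPrime, hfind]
  omega

lemma pvBLoop_spec : ∀ (cs : List Int) (p : Int) (k : Nat), 2 ≤ p →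
    Nat.count Nat.Prime p.toNat = k → pvBLoop cs p = pvSpecLoop cs k := by
  intro cs
  induction cs with
  | nil => intros; rfl
  | cons c cs ih =>
    intro p k hp hk
    rw [pvBLoop, pvSpecLoop]
    by_cases h0 : c == 0
    · rw [if_pos h0, if_pos h0, ih p k hp hk]
    · rw [if_neg h0, if_neg h0]
      have hq := pvNextPrime_eq p hp
      rw [hk] at hq
      have hprime := Nat.nth_mem_of_infinite Nat.infinite_setOf_prime k
      rw [hq]
      show PySem.Int.mod (c - (((Nat.nth Nat.Prime k : Nat) : Int) - 1)) 29
            :: pvBLoop cs (((Nat.nth Nat.Prime k : Nat) : Int) + 1)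
          = PySem.Int.mod (c - (((Nat.nth Nat.Prime k : Nat) : Int) - 1)) 29 :: pvSpecLoop cs (k + 1)
      congr 1
      apply ih
      · have h2 : (2 : Int) ≤ ((Nat.nth Nat.Prime k : Nat) : Int) := by
          exact_mod_cast hprime.two_le
        omega
      · rw [show (((Nat.nth Nat.Prime k : Nat) : Int) + 1).toNat = Nat.nth Nat.Prime k + 1 by omega,
          Nat.count_succ, if_pos hprime,
          Nat.count_nth_of_infinite Nat.infinite_setOf_prime k]

-- ===== VERDICT (by name: the statement is the Claim_ definition above) =====
theorem totient_decrypt_spec : Claim_equal_totient_decrypt := by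
  intro cipher _
  unfold Spec_totient_decrypt totient_decrypt totient_decrypt_alt
  have hA : generate_primes ((cipher.length : Int) + 100)
      = (List.range (cipher.length + 100)).map (fun i => ((Nat.nth Nat.Prime i : Nat) : Int)) := by
    have := pvGenerate (cipher.length + 100)
    rwa [Nat.cast_add] at this
  rw [hA, pvALoop_spec (cipher.length + 100) cipher 0 (by omega),
    pvBLoop_spec cipher 2 0 (by norm_num) (by decide)]
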